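-- pv_equiv track=rewrite | github.com/pedramaghazadeh/Assembler-Disassembler-with-Python | Aghazadeh-Pedram-610397085-hAssembler.py | make_reverse
-- ===== SOURCE A (Python) =====
-- def make_reverse(str):
--     ans = ""
--     ind = len(str) - 2
--     while(ind >= 0):
--         ans += str[ind]
--         ans += str[ind + 1]
--         ind -= 2
--     return ans
-- ===== SOURCE B (Python) =====
-- def make_reverse(str):
--     start = len(str) % 2
--     chunks = [str[i:i+2] for i in range(start, len(str), 2)]
--     return ''.join(reversed(chunks))
-- ===== Notes on version B (the rewrite author's own statement) =====
-- stated objective: faster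
-- what changed: Replaces A's backward index-arithmetic while-loop with quadratic running string concatenation by a forward comprehension of 2-char slices from offset len%2, reversed and joined once.
import Mathlib
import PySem

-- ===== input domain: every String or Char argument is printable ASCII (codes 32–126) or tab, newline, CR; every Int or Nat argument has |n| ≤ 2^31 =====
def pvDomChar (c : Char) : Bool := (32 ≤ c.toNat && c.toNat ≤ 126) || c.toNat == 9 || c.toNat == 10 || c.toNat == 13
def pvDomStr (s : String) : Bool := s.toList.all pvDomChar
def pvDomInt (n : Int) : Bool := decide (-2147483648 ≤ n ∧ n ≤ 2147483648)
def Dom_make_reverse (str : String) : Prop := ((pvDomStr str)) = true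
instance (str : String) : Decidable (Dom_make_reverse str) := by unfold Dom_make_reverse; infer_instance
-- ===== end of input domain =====

-- B replaces A's backward index-arithmetic while-loop with a forward 2-char-chunk
-- comprehension reversed and joined once (objective: simpler).

-- ===== PORT A =====
-- while ind >= 0: ans += str[ind]; ans += str[ind+1]; ind -= 2
-- (the IndexError branch of pyGet? is unreachable from make_reverse's initial ind)
def goA (l : List Char) (ind : Int) (ans : List Char) : List Char :=
  if _h : 0 ≤ ind then
    match PySem.List.pyGet? l ind, PySem.List.pyGet? l (ind + 1) with
    | some c1, some c2 => goA l (ind - 2) (ans ++ [c1, c2])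
    | _, _ => ans
  else ans
termination_by (ind + 2).toNat
decreasing_by omega

def make_reverse (str : String) : String :=
  String.mk (goA str.toList ((str.toList.length : Int) - 2) [])

-- ===== PORT B =====
def make_reverse_alt (str : String) : String :=
  let l := str.toList
  let n : Int := l.length
  let start : Int := PySem.Int.mod n 2
  let chunks := (PySem.List.pyRange start n 2).map
    (fun i => PySem.List.slice l (some i) (some (i + 2)))
  String.mk chunks.reverse.flatten

-- ===== PRECONDITION & SPEC =====
def Spec_make_reverse (str : String) (out : String) : Prop := out = make_reverse_alt str
instance (str : String) (out : String) : Decidable (Spec_make_reverse str out) := by unfold Spec_make_reverse; infer_instance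

-- ===== CLAIM (what is proved, stated in full; the proofs are below) =====
def Claim_equal_make_reverse : Prop := ∀ (str : String), Dom_make_reverse str → Spec_make_reverse str (make_reverse str)

-- ===== LEMMAS AND PROOFS =====

lemma pyRange_two (s : Int) (m : Nat) :
    PySem.List.pyRange s (s + 2 * m) 2 = (List.range m).map (fun k : Nat => s + 2 * (k : Int)) := by
  rw [PySem.List.pyRange_of_pos _ _ (by norm_num)]
  rcases m with _ | m
  · simp
  · have h : s < s + 2 * ((m : Int) + 1) := by omega
    have hc : ((s + 2 * ((m : Int) + 1) - s + 2 - 1) / 2).toNat = m + 1 := by omega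
    simp only [Nat.cast_add, Nat.cast_one, if_pos h]
    rw [hc]

lemma key (l : List Char) (s : Nat) (hs : s ≤ 1) :
    ∀ (k : Nat) (acc : List Char), s + 2 * k ≤ l.length →
    goA l ((s : Int) + 2 * k - 2) acc =
      acc ++ (((PySem.List.pyRange s (s + 2 * k) 2).map
        (fun i => PySem.List.slice l (some i) (some (i + 2)))).reverse.flatten) := by
  intro k
  induction k with
  | zero =>
    intro acc _
    rw [goA]
    simp only [Nat.cast_zero, mul_zero, add_zero]
    rw [dif_neg (show ¬ (0 : Int) ≤ (s : Int) - 2 by omega)]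
    have hr : PySem.List.pyRange (s : Int) (s : Int) 2 = [] := by
      rw [PySem.List.pyRange_of_pos _ _ (by norm_num)]; simp
    rw [hr]
    simp
  | succ k ih =>
    intro acc hle
    have hj : s + 2 * k + 1 < l.length := by omega
    have hj0 : s + 2 * k < l.length := by omega
    rw [goA]
    have hpos : (0 : Int) ≤ (s : Int) + 2 * (k + 1 : Nat) - 2 := by push_cast; omega
    rw [dif_pos hpos]
    have e1 : (s : Int) + 2 * ((k : Nat) + 1 : Nat) - 2 = ((s + 2 * k : Nat) : Int) := by
      push_cast; ring
    have e2 : (s : Int) + 2 * ((k : Nat) + 1 : Nat) - 2 + 1 = ((s + 2 * k + 1 : Nat) : Int) := by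
      push_cast; ring
    rw [e1]
    have g1 : PySem.List.pyGet? l ((s + 2 * k : Nat) : Int) = some l[s + 2 * k] := by
      rw [PySem.List.pyGet?_natCast]; exact List.getElem?_eq_getElem hj0
    have g2 : PySem.List.pyGet? l (((s + 2 * k : Nat) : Int) + 1) = some l[s + 2 * k + 1] := by
      rw [show ((s + 2 * k : Nat) : Int) + 1 = ((s + 2 * k + 1 : Nat) : Int) by push_cast; ring,
        PySem.List.pyGet?_natCast]
      exact List.getElem?_eq_getElem hj
    rw [g1, g2]
    
    have e3 : ((s + 2 * k : Nat) : Int) - 2 = (s : Int) + 2 * (k : Nat) - 2 := by push_cast; ring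
    rw [e3]
    dsimp only
    rw [ih (acc ++ [l[s + 2 * k], l[s + 2 * k + 1]]) (by omega)]
    -- now compare the range decompositions
    rw [show ((s : Int) + 2 * ((k : Nat) + 1 : Nat)) = (s : Int) + 2 * ((k + 1 : Nat) : Int) by push_cast; ring]
    rw [show ((s : Int) + 2 * (k : Nat)) = (s : Int) + 2 * ((k : Nat) : Int) by push_cast; ring]
    rw [pyRange_two s (k + 1), pyRange_two s k, List.range_succ]
    have hsl : PySem.List.slice l (some ((s : Int) + 2 * (k : Nat)))
        (some ((s : Int) + 2 * (k : Nat) + 2)) = [l[s + 2 * k], l[s + 2 * k + 1]] := by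
      rw [show (s : Int) + 2 * (k : Nat) = ((s + 2 * k : Nat) : Int) by push_cast; ring,
        show ((s + 2 * k : Nat) : Int) + 2 = ((s + 2 * k + 2 : Nat) : Int) by push_cast; ring,
        PySem.List.slice_natCast]
      have h2 : (s + 2 * k + 2) - (s + 2 * k) = 2 := by omega
      rw [h2, List.drop_eq_getElem_cons hj0,
        List.drop_eq_getElem_cons (show s + 2 * k + 1 < l.length by omega)]
      rfl
    simp only [List.map_append, List.map_cons, List.map_nil, List.reverse_append,
      List.reverse_cons, List.reverse_nil, List.nil_append, List.flatten_cons, hsl]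
    simp

-- ===== VERDICT (by name: the statement is the Claim_ definition above) =====
theorem make_reverse_spec : Claim_equal_make_reverse := by
  intro str _
  unfold Spec_make_reverse make_reverse make_reverse_alt
  set l := str.toList with hl
  have hmod : PySem.Int.mod ((l.length : Int)) 2 = ((l.length % 2 : Nat) : Int) := by
    simp [PySem.Int.mod, Int.fmod_eq_emod]
  have hn : l.length = l.length % 2 + 2 * (l.length / 2) := by omega
  have h := key l (l.length % 2) (by omega) (l.length / 2) [] (by omega)
  simp only [hmod]
  rw [show ((l.length : Int)) - 2 = ((l.length % 2 : Nat) : Int) + 2 * ((l.length / 2 : Nat)) - 2 by push_cast; omega]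
  rw [show ((l.length : Int)) = ((l.length % 2 : Nat) : Int) + 2 * ((l.length / 2 : Nat)) by push_cast; omega]
  rw [h]
  simp
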